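-- pv_equiv track=rewrite | github.com/ezberlin/pythonprojects | nochapter/stuff/iota_bot.py | formate
-- ===== SOURCE A (Python) =====
-- def formate(string): #Macht deine Frage grammatikalisch fragwürdig + lesbar
--     newstring = ""
--     prohibited_letters = [".", ",", "!", "?", ":", ";", "§"]
--     string = string.strip()
--     lastspace = False
--     for letter in string:
--         if not letter in prohibited_letters:
--             if lastspace and letter == " ":
--                 continue
--             newstring = newstring + letter
--             if letter == " ":
--                 lastspace = True
--             else:
--                 lastspace = False
--     return newstring
-- ===== SOURCE B (Python) =====
-- def formate(string):
--     prohibited = {".", ",", "!", "?", ":", ";", "§"}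
--     filtered = "".join(c for c in string.strip() if c not in prohibited)
--     return filtered[:1] + "".join(
--         c for p, c in zip(filtered, filtered[1:]) if not (p == " " and c == " ")
--     )
-- ===== Notes on version B (the rewrite author's own statement) =====
-- stated objective: simpler
-- what changed: Replaces A's single stateful loop with a lastspace flag by two stateless passes: a comprehension filtering out the prohibited characters, then a zip-with-previous pass that drops a space following a space.
import Mathlib
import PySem

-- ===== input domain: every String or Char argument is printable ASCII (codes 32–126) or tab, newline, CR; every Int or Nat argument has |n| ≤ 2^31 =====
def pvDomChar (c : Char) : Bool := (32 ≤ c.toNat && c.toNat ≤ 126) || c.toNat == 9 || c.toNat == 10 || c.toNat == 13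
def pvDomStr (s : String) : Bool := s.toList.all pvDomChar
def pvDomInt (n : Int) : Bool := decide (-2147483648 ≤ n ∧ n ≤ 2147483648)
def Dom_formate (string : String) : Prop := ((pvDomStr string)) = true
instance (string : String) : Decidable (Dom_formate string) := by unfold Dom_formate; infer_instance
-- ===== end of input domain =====

-- B replaces A's single stateful loop (lastspace flag) by two stateless passes: filter out the
-- prohibited characters, then drop each space that follows a space (zip with the predecessor).

-- ===== PORT A =====
def formateProhibited : List Char := ['.', ',', '!', '?', ':', ';', '§']

-- A's for-loop: state (newstring, lastspace); branches in source order.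
def formateLoop : List Char → List Char → Bool → List Char
  | [], newstring, _ => newstring
  | letter :: rest, newstring, lastspace =>
    if ¬ formateProhibited.contains letter then
      if lastspace && letter == ' ' then
        formateLoop rest newstring lastspace
      else
        formateLoop rest (newstring ++ [letter]) (letter == ' ')
    else
      formateLoop rest newstring lastspace

def formate (string : String) : String :=
  String.mk (formateLoop (PySem.Str.strip string).toList [] false)

-- ===== PORT B =====
-- filtered = "".join(c for c in string.strip() if c not in prohibited)
-- return filtered[:1] + "".join(c for p,c in zip(filtered, filtered[1:]) if not (p==' ' and c==' '))
def formate_alt (string : String) : String :=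
  let filtered := (PySem.Str.strip string).toList.filter
      (fun c => ¬ formateProhibited.contains c)
  String.mk (filtered.take 1 ++
    (filtered.zip (filtered.drop 1)).filterMap
      (fun pc => if pc.1 == ' ' && pc.2 == ' ' then none else some pc.2))

-- ===== PRECONDITION & SPEC =====
def Spec_formate (string : String) (out : String) : Prop := out = formate_alt string
instance (string : String) (out : String) : Decidable (Spec_formate string out) := by unfold Spec_formate; infer_instance

-- ===== CLAIM (what is proved, stated in full; the proofs are below) =====
def Claim_equal_formate : Prop := ∀ (string : String), Dom_formate string → Spec_formate string (formate string)

-- ===== LEMMAS AND PROOFS =====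

-- reference collapse with carried "previous kept char was a space" flag
def collapse2 : List Char → Bool → List Char
  | [], _ => []
  | c :: t, ls =>
    if ls && c == ' ' then collapse2 t ls
    else c :: collapse2 t (c == ' ')

lemma formateLoop_eq_collapse2 (l : List Char) (acc : List Char) (ls : Bool) :
    formateLoop l acc ls =
      acc ++ collapse2 (l.filter (fun c => ¬ formateProhibited.contains c)) ls := by
  induction l generalizing acc ls with
  | nil => simp [formateLoop, collapse2]
  | cons c t ih =>
    by_cases hp : formateProhibited.contains c = true
    · have h1 : formateLoop (c :: t) acc ls = formateLoop t acc ls := by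
        rw [formateLoop, if_neg (by simpa using hp)]
      have h2 : (c :: t).filter (fun x => ¬ formateProhibited.contains x)
          = t.filter (fun x => ¬ formateProhibited.contains x) := by
        simp [List.filter_cons]
        simpa using hp
      rw [h1, h2, ih]
    · have h2 : (c :: t).filter (fun x => ¬ formateProhibited.contains x)
          = c :: t.filter (fun x => ¬ formateProhibited.contains x) := by
        simp [List.filter_cons]
        simpa using hp
      rw [h2]
      by_cases hs : (ls && c == ' ') = true
      · have h1 : formateLoop (c :: t) acc ls = formateLoop t acc ls := by
          rw [formateLoop, if_pos (by simpa using hp), if_pos hs]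
        rw [h1, ih]
        conv_rhs => rw [collapse2]
        rw [if_pos hs]
      · have h1 : formateLoop (c :: t) acc ls = formateLoop t (acc ++ [c]) (c == ' ') := by
          rw [formateLoop, if_pos (by simpa using hp), if_neg hs]
        rw [h1, ih]
        conv_rhs => rw [collapse2]
        rw [if_neg hs]
        simp

lemma zip_filterMap_eq_collapse2 (t : List Char) (p : Char) :
    ((p :: t).zip t).filterMap
        (fun pc => if pc.1 == ' ' && pc.2 == ' ' then none else some pc.2)
      = collapse2 t (p == ' ') := by
  induction t generalizing p with
  | nil => simp [collapse2]
  | cons c t' ih =>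
    rw [List.zip_cons_cons, List.filterMap_cons]
    by_cases h : (p == ' ' && c == ' ') = true
    · have hc : (c == ' ') = true := (by simpa using h : (p == ' ') = true ∧ (c == ' ') = true).2
      have hp : (p == ' ') = true := (by simpa using h : (p == ' ') = true ∧ (c == ' ') = true).1
      rw [if_pos h, ih, collapse2, if_pos (by rw [hp, hc]; rfl), hp, hc]
    · rw [if_neg h, ih, collapse2, if_neg h]

lemma collapse2_false (l : List Char) :
    collapse2 l false = l.take 1 ++
      (l.zip (l.drop 1)).filterMap
        (fun pc => if pc.1 == ' ' && pc.2 == ' ' then none else some pc.2) := by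
  cases l with
  | nil => simp [collapse2]
  | cons c t =>
    rw [List.drop_one, List.tail_cons, zip_filterMap_eq_collapse2 t c]
    rw [collapse2, if_neg (by simp)]
    simp

-- ===== VERDICT (by name: the statement is the Claim_ definition above) =====
theorem formate_spec : Claim_equal_formate := by
  intro s _
  unfold Spec_formate formate formate_alt
  rw [formateLoop_eq_collapse2, collapse2_false]
  rw [List.nil_append]
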